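-- pv_equiv track=rewrite | github.com/mstockl9/ayed1-2025-tps | TP3/tp3ej2_matrizpatrones.py | filas_x2
-- ===== SOURCE A (Python) =====
-- from typing import List
--
-- def filas_x2(n: int) -> List[List[int]]:
--     """
--     Genera una matriz de N x N con un patrón que consiste en filas que van desde 1 abajo de todo, y van multiplicando
--     entre dos a medida que van subiendo.
--
--     Pre: N debe ser un entero positivo.
--     Post: Retorna la matriz de N x N con el patrón descrito previamente.
--     """
--     matriz = [[] for fila in range(n)]
--     nro_x2 = 1
--
--     for fila in matriz:
--         for x in range(n):
--             fila.append(nro_x2)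
--         nro_x2 *= 2
--
--     matriz.reverse()
--     return matriz
-- ===== SOURCE B (Python) =====
-- from typing import List
--
-- def filas_x2(n: int) -> List[List[int]]:
--     return [[2 ** (n - 1 - i)] * n for i in range(n)]
-- ===== Notes on version B (the rewrite author's own statement) =====
-- stated objective: simpler
-- what changed: Replaces the accumulate-by-doubling loop with appended rows plus a final reverse by a single comprehension that builds the matrix directly top-to-bottom, computing each row's value as a closed-form power of two from its row index and replicating it, so there is no accumulator and no reverse step.
import Mathlib
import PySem

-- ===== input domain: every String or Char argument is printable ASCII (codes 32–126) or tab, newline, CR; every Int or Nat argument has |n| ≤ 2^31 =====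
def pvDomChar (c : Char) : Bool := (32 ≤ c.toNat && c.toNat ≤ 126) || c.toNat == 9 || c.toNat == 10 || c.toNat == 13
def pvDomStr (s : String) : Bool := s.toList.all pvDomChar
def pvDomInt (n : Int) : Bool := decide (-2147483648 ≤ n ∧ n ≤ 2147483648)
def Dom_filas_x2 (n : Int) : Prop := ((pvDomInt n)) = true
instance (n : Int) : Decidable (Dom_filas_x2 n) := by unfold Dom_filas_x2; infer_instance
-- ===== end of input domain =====

-- B replaces A's doubling accumulator + final reverse by a direct top-to-bottom build with the closed form 2^(n-1-i); objective: simpler.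
-- ===== PORT A =====

def filas_x2 (n : Int) : List (List Int) :=
  let matriz : List (List Int) := (PySem.List.pyRange 0 n 1).map (fun _ => [])
  let res := matriz.foldl
    (fun (acc : List (List Int) × Int) fila =>
      (acc.1 ++ [(PySem.List.pyRange 0 n 1).foldl (fun f _ => f ++ [acc.2]) fila], acc.2 * 2))
    ([], 1)
  res.1.reverse

-- ===== PORT B =====
def filas_x2_alt (n : Int) : List (List Int) :=
  (PySem.List.pyRange 0 n 1).map (fun i => List.replicate n.toNat ((2 : Int) ^ (n - 1 - i).toNat))

-- ===== PRECONDITION & SPEC =====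
def Spec_filas_x2 (n : Int) (out : List (List Int)) : Prop := out = filas_x2_alt n
instance (n : Int) (out : List (List Int)) : Decidable (Spec_filas_x2 n out) := by unfold Spec_filas_x2; infer_instance

-- ===== CLAIM (what is proved, stated in full; the proofs are below) =====
def Claim_equal_filas_x2 : Prop := ∀ (n : Int), Dom_filas_x2 n → Spec_filas_x2 n (filas_x2 n)

-- ===== LEMMAS AND PROOFS =====
theorem pv_inner_fold (L : List Int) (fila : List Int) (v : Int) :
    L.foldl (fun f _ => f ++ [v]) fila = fila ++ List.replicate L.length v := by
  induction L generalizing fila with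
  | nil => simp
  | cons a t ih =>
      simp [List.foldl_cons, ih, List.replicate_succ]

theorem pv_outer_fold (k : Nat) (m : Nat) (rows : List (List Int)) (p : Int) :
    ((List.range m).map (fun _ => ([] : List Int))).foldl
        (fun (acc : List (List Int) × Int) fila =>
          (acc.1 ++ [fila ++ List.replicate k acc.2], acc.2 * 2)) (rows, p)
      = (rows ++ (List.range m).map (fun j => List.replicate k (p * 2 ^ j)), p * 2 ^ m) := by
  induction m generalizing rows p with
  | zero => simp
  | succ m ih =>
      rw [List.range_succ, List.map_append, List.foldl_append, ih]
      simp [List.map_append]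
      ring

theorem filas_x2_eq (n : Int) : filas_x2 n = filas_x2_alt n := by
  unfold filas_x2 filas_x2_alt
  rw [PySem.List.pyRange_one]
  simp only [Int.sub_zero, zero_add, List.map_map]
  simp only [pv_inner_fold, List.length_map, List.length_range, Function.comp_def]
  rw [pv_outer_fold]
  simp only [List.nil_append, one_mul]
  apply List.ext_getElem
  · simp
  · intro i h1 h2
    simp only [List.length_reverse, List.length_map, List.length_range] at h1
    rw [List.getElem_reverse]
    simp only [List.getElem_map, List.getElem_range, List.length_map, List.length_range]
    have h3 : ((n - 1 - (i:Int))).toNat = n.toNat - 1 - i := by omega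
    rw [h3]

-- ===== VERDICT (by name: the statement is the Claim_ definition above) =====
theorem filas_x2_spec : Claim_equal_filas_x2 := by
  intro n _
  unfold Spec_filas_x2
  exact filas_x2_eq n
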